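-- pv_equiv track=rewrite | github.com/xobs/coriolis | stratus1/src/stratus/util_Shift.py | ln2p
-- ===== SOURCE A (Python) =====
-- def ln2p ( n ) :
--   i = 0
--   j = n & 1
--
--   if ( n ) :
--     i = -1
--     while n > 0 :
--       j  += ( n & 1 )
--       i  += 1
--       n >>= 1
--
--   return i + ( j > 1 )
-- ===== SOURCE B (Python) =====
-- def ln2p(n):
--     if n <= 0:
--         return 0 if n == 0 else -1
--     pc = bin(n).count('1')
--     j = (n & 1) + pc
--     return n.bit_length() - 1 + (1 if j > 1 else 0)
-- ===== Notes on version B (the rewrite author's own statement) =====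
-- stated objective: idiomatic
-- what changed: Replaces the shift-and-count while-loop with a closed form built from int.bit_length() and bin(n).count('1'), keeping the (n & 1) + popcount adjustment term verbatim.
import Mathlib
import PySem

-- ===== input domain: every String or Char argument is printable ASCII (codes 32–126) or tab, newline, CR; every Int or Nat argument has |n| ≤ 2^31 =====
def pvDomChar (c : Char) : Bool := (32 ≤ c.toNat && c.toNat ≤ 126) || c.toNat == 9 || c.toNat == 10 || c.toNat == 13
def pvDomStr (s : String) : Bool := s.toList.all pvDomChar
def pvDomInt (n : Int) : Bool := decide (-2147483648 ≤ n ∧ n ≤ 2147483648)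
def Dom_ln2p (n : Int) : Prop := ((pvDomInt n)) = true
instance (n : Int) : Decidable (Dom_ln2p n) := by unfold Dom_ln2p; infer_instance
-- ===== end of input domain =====

-- B replaces A's shift-and-count loop by a closed form from bit_length/popcount (idiomatic; same values everywhere).

-- ===== PORT A =====
-- while n > 0: j += n & 1; i += 1; n >>= 1   (returns final (j, i))
def ln2pLoop (n j i : Int) : Int × Int :=
  if h : 0 < n then
    ln2pLoop (PySem.Int.floordiv n 2) (j + PySem.Int.mod n 2) (i + 1)
  else (j, i)
termination_by n.toNat
decreasing_by
  rw [PySem.Int.floordiv_eq_ediv_of_pos (by omega)]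
  omega

def ln2p (n : Int) : Int :=
  let i : Int := 0
  let j : Int := PySem.Int.mod n 2          -- n & 1
  if n ≠ 0 then
    let p := ln2pLoop n j (-1)              -- i = -1, then the while loop
    p.2 + (if p.1 > 1 then 1 else 0)
  else i + (if j > 1 then 1 else 0)

-- ===== PORT B =====
def ln2p_alt (n : Int) : Int :=
  if n ≤ 0 then (if n = 0 then 0 else -1)
  else
    let pc : Int := PySem.Int.bitCount n            -- bin(n).count('1')
    let j : Int := PySem.Int.mod n 2 + pc           -- (n & 1) + pc
    (PySem.Int.bitLength n : Int) - 1 + (if j > 1 then 1 else 0)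

-- ===== PRECONDITION & SPEC =====
def Spec_ln2p (n : Int) (out : Int) : Prop := out = ln2p_alt n
instance (n : Int) (out : Int) : Decidable (Spec_ln2p n out) := by unfold Spec_ln2p; infer_instance

-- ===== CLAIM (what is proved, stated in full; the proofs are below) =====
def Claim_equal_ln2p : Prop := ∀ (n : Int), Dom_ln2p n → Spec_ln2p n (ln2p n)

-- ===== LEMMAS AND PROOFS =====

theorem ln2pLoop_eq (m : Nat) : ∀ (j i : Int),
    ln2pLoop (m : Int) j i = (j + PySem.Int.bitCount (m : Int), i + PySem.Int.bitLength (m : Int)) := by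
  induction m using Nat.strong_induction_on with
  | _ m ih =>
    intro j i
    rw [ln2pLoop]
    by_cases hm : 0 < m
    · have h2 : (m / 2 : Nat) < m := by omega
      rw [dif_pos (by exact_mod_cast hm)]
      rw [(by exact_mod_cast PySem.Int.floordiv_natCast m 2 : PySem.Int.floordiv (m : Int) 2 = ((m / 2 : Nat) : Int)),
        (by exact_mod_cast PySem.Int.mod_natCast m 2 : PySem.Int.mod (m : Int) 2 = ((m % 2 : Nat) : Int)),
        ih _ h2, PySem.Int.bitCount_natCast hm, PySem.Int.bitLength_natCast hm]
      rw [Prod.ext_iff]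
      constructor <;> push_cast <;> ring
    · have : m = 0 := by omega
      subst this
      simp [PySem.Int.bitCount_zero, PySem.Int.bitLength_zero]

theorem mod_two_bounds (n : Int) : 0 ≤ PySem.Int.mod n 2 ∧ PySem.Int.mod n 2 < 2 := by
  rw [PySem.Int.mod_eq_emod_of_pos (by omega)]
  constructor
  · exact Int.emod_nonneg n (by omega)
  · exact Int.emod_lt_of_pos n (by omega)

-- ===== VERDICT (by name: the statement is the Claim_ definition above) =====
theorem ln2p_spec : Claim_equal_ln2p := by
  intro n _
  unfold Spec_ln2p ln2p ln2p_alt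
  rcases lt_trichotomy n 0 with hneg | hz | hpos
  · have hb := mod_two_bounds n
    rw [if_pos (by omega), if_pos (by omega), if_neg (by omega)]
    rw [ln2pLoop, dif_neg (by omega)]
    simp only []
    rw [if_neg (by omega)]
    norm_num
  · subst hz
    simp [PySem.Int.mod]
  · have hn : n = ((n.toNat : Nat) : Int) := by omega
    rw [if_pos (by omega), if_neg (by omega)]
    simp only []
    rw [hn, ln2pLoop_eq]
    by_cases hj : PySem.Int.mod ((n.toNat : Nat) : Int) 2 + (PySem.Int.bitCount ((n.toNat : Nat) : Int) : Int) > 1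
    · rw [if_pos hj]; simp
    · rw [if_neg hj]; simp; ring
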